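-- pv_equiv track=rewrite | github.com/jonathonreilly/toy-physics | scripts/frontier_yt_pr230_two_source_taste_radial_chunk_package_audit.py | contiguous_prefix
-- ===== SOURCE A (Python) =====
-- def contiguous_prefix(ids: list[int]) -> list[int]:
--     expected = 1
--     prefix: list[int] = []
--     for chunk_id in ids:
--         if chunk_id != expected:
--             break
--         prefix.append(chunk_id)
--         expected += 1
--     return prefix
-- ===== SOURCE B (Python) =====
-- def contiguous_prefix(ids: list[int]) -> list[int]:
--     # Binary search on the answer length: P(m) = "ids[:m] == [1..m]" is monotone
--     # (downward closed), so the maximal m with P(m) can be found by bisection.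
--     lo, hi = 0, len(ids)
--     while lo < hi:
--         mid = (lo + hi + 1) // 2
--         if ids[:mid] == list(range(1, mid + 1)):
--             lo = mid
--         else:
--             hi = mid - 1
--     return list(range(1, lo + 1))
-- ===== Notes on version B (the rewrite author's own statement) =====
-- stated objective: alternative
-- what changed: Replaces A's left-to-right scan with an accumulator by a binary search on the prefix length: the predicate ids[:m]==list(range(1,m+1)) is downward closed in m, so bisection finds the maximal matching length and the result is built as a range, never from collected elements.
import Mathlib
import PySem

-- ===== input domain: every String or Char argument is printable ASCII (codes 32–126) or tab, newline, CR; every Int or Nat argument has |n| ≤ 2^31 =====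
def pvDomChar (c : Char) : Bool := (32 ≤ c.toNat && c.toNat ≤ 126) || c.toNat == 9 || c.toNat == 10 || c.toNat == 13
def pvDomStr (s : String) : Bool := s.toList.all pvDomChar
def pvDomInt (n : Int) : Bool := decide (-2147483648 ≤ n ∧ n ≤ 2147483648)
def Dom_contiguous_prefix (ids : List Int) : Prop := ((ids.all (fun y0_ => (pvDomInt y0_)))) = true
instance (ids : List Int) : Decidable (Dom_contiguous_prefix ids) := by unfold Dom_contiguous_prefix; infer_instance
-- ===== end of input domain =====

-- B replaces A's accumulating scan by a binary search on the prefix length; objective: alternative.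

-- ===== PORT A =====
-- the for-loop with `expected` counter and early break, as structural recursion
def pvGoA : List Int → Int → List Int
  | [], _ => []
  | x :: xs, e => if x ≠ e then [] else x :: pvGoA xs (e + 1)

def contiguous_prefix (ids : List Int) : List Int := pvGoA ids 1

-- ===== PORT B =====
-- the `while lo < hi` bisection loop of Source B; ids[:mid] is PySem.List.slice,
-- list(range(1, mid+1)) is PySem.List.pyRange
-- fuel = hi - lo bounds the number of iterations (each step shrinks the
-- interval by at least one); it is only a totality device, the computation
-- is exactly the Python loop
def pvBSF : Nat → List Int → Nat → Nat → Nat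
  | 0, _, lo, _ => lo
  | n + 1, ids, lo, hi =>
    if lo < hi then
      let mid := (lo + hi + 1) / 2
      if PySem.List.slice ids none (some (mid : Int)) =
          PySem.List.pyRange 1 ((mid : Int) + 1) 1 then
        pvBSF n ids mid hi
      else
        pvBSF n ids lo (mid - 1)
    else lo

def pvBS (ids : List Int) (lo hi : Nat) : Nat := pvBSF (hi - lo) ids lo hi

-- list(range(1, lo + 1))
def contiguous_prefix_alt (ids : List Int) : List Int :=
  PySem.List.pyRange 1 ((pvBS ids 0 ids.length : Int) + 1) 1

-- ===== PRECONDITION & SPEC =====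
def Spec_contiguous_prefix (ids : List Int) (out : List Int) : Prop := out = contiguous_prefix_alt ids
instance (ids : List Int) (out : List Int) : Decidable (Spec_contiguous_prefix ids out) := by unfold Spec_contiguous_prefix; infer_instance

-- ===== CLAIM =====
def Claim_equal_contiguous_prefix : Prop := ∀ (ids : List Int), Dom_contiguous_prefix ids → Spec_contiguous_prefix ids (contiguous_prefix ids)

-- ===== LEMMAS AND PROOFS =====

-- ghost quantity for the proofs: length of the maximal matching prefix starting at offset i
def pvBrk : List Int → Nat → Nat
  | [], _ => 0
  | x :: xs, i => if x = (i : Int) + 1 then pvBrk xs (i + 1) + 1 else 0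

theorem pvBrk_le_length : ∀ (xs : List Int) (i : Nat), pvBrk xs i ≤ xs.length := by
  intro xs
  induction xs with
  | nil => intro i; simp [pvBrk]
  | cons x xs ih =>
    intro i
    simp only [pvBrk, List.length_cons]
    split
    · exact Nat.succ_le_succ (ih (i + 1))
    · omega

theorem take_eq_range_iff : ∀ (xs : List Int) (i m : Nat),
    (xs.take m = (List.range m).map (fun j : Nat => ((i + j + 1 : Nat) : Int))) ↔ m ≤ pvBrk xs i := by
  intro xs
  induction xs with
  | nil =>
    intro i m
    cases m with
    | zero => simp [pvBrk]
    | succ m => simp [pvBrk, List.range_succ_eq_map]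
  | cons x xs ih =>
    intro i m
    cases m with
    | zero => simp
    | succ m =>
      simp only [List.take_succ_cons, List.range_succ_eq_map, List.map_cons, List.map_map,
        List.cons_eq_cons, pvBrk]
      constructor
      · rintro ⟨hx, ht⟩
        have hx' : x = (i : Int) + 1 := by rw [hx]; push_cast; ring
        rw [if_pos hx']
        have : xs.take m = (List.range m).map (fun j : Nat => (((i + 1) + j + 1 : Nat) : Int)) := by
          rw [ht]
          apply List.map_congr_left
          intro j _
          simp only [Function.comp_apply]
          push_cast; ring
        exact Nat.succ_le_succ ((ih (i + 1) m).1 this)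
      · intro h
        by_cases hx : x = (i : Int) + 1
        · rw [if_pos hx] at h
          have hm : m ≤ pvBrk xs (i + 1) := by omega
          have ht := (ih (i + 1) m).2 hm
          refine ⟨by rw [hx]; push_cast; ring, ?_⟩
          rw [ht]
          apply List.map_congr_left
          intro j _
          simp only [Function.comp_apply]
          push_cast; ring
        · rw [if_neg hx] at h; omega

-- the bisection condition decides exactly "mid ≤ pvBrk ids 0"
theorem cond_iff (ids : List Int) (m : Nat) :
    (PySem.List.slice ids none (some (m : Int)) = PySem.List.pyRange 1 ((m : Int) + 1) 1) ↔
      m ≤ pvBrk ids 0 := by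
  rw [PySem.List.slice_to_natCast, PySem.List.pyRange_one]
  have hm : (((m : Int) + 1) - 1).toNat = m := by omega
  rw [hm]
  rw [show ((List.range m).map (fun k : Nat => (1 : Int) + k)) =
      (List.range m).map (fun j : Nat => ((0 + j + 1 : Nat) : Int)) by
    apply List.map_congr_left; intro j _; push_cast; ring]
  exact take_eq_range_iff ids 0 m

theorem pvBSF_eq (ids : List Int) : ∀ (n lo hi : Nat), hi - lo ≤ n →
    lo ≤ pvBrk ids 0 → pvBrk ids 0 ≤ hi → pvBSF n ids lo hi = pvBrk ids 0 := by
  intro n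
  induction n with
  | zero => intro lo hi hn hlo hhi; simp only [pvBSF]; omega
  | succ n IH =>
    intro lo hi hn hlo hhi
    simp only [pvBSF]
    by_cases h : lo < hi
    · rw [if_pos h]
      set mid := (lo + hi + 1) / 2 with hmid
      have h1 : lo < mid := by omega
      have h2 : mid ≤ hi := by omega
      by_cases hc : PySem.List.slice ids none (some (mid : Int)) =
          PySem.List.pyRange 1 ((mid : Int) + 1) 1
      · rw [if_pos hc]
        have hk : mid ≤ pvBrk ids 0 := (cond_iff ids mid).1 hc
        exact IH mid hi (by omega) hk hhi
      · rw [if_neg hc]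
        have hk : ¬ mid ≤ pvBrk ids 0 := fun hh => hc ((cond_iff ids mid).2 hh)
        exact IH lo (mid - 1) (by omega) hlo (by omega)
    · rw [if_neg h]; omega

-- A's loop produces exactly the range of the first pvBrk values
theorem pvGoA_eq : ∀ (xs : List Int) (i : Nat),
    pvGoA xs ((i : Int) + 1) = (List.range (pvBrk xs i)).map (fun j : Nat => ((i + 1 + j : Nat) : Int)) := by
  intro xs
  induction xs with
  | nil => intro i; simp [pvGoA, pvBrk]
  | cons x xs ih =>
    intro i
    simp only [pvGoA, pvBrk]
    by_cases hx : x = (i : Int) + 1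
    · rw [if_neg (by simpa using hx), if_pos hx]
      rw [List.range_succ_eq_map, List.map_cons, List.map_map, List.cons_eq_cons]
      constructor
      · rw [hx]; push_cast; ring
      · rw [show ((i : Int) + 1 + 1) = (((i + 1 : Nat) : Int) + 1) by push_cast; ring, ih (i + 1)]
        apply List.map_congr_left
        intro j _
        simp only [Function.comp_apply]
        push_cast; ring
    · rw [if_pos (by simpa using hx), if_neg (by simpa [pvBrk] using hx)]
      simp

-- ===== VERDICT =====
theorem contiguous_prefix_spec : Claim_equal_contiguous_prefix := by
  intro ids _
  unfold Spec_contiguous_prefix contiguous_prefix contiguous_prefix_alt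
  have hbs : pvBS ids 0 ids.length = pvBrk ids 0 :=
    pvBSF_eq ids (ids.length - 0) 0 ids.length (le_refl _) (Nat.zero_le _) (pvBrk_le_length ids 0)
  have h := pvGoA_eq ids 0
  simp only [Nat.cast_zero, zero_add] at h
  rw [h, hbs, PySem.List.pyRange_one]
  have hk : (((pvBrk ids 0 : Int) + 1) - 1).toNat = pvBrk ids 0 := by omega
  rw [hk]
  apply List.map_congr_left
  intro j _
  push_cast; ring
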